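/- GENERATED by mk_final_copies.py from the proof of the farm's unit `start_decoder.F2a` (farm:start_decoder.F2a.1: Proof.lean) as the
   re-elaboration sweep compiled it — do not edit. -/
import Asan.CheckWalk
import Vorbis.Spec.StartDecoderBTest
import Vorbis.Spec.Units.start_decoder_F2a
import Vorbis.Spec.StartDecoderFloor
import Vorbis.Spec.Worked.start_decoder_F2a_Lemmas

namespace Vorbis.Spec.start_decoder_F2a
open X86 X86.User Asan Vorbis Vorbis.Spec Vorbis.Spec.StartDecoder

/-- **Segment F2a of `start_decoder`** (0x11526a … 0x11528e and the callee, stb_vorbis_fixed.c:3966–3967: the test of the floor loop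
with its load4 check of `f->floor_count`, then `get_bits(f, 16)`): the machine part is `f2_head` (Lemmas.lean), which ends in plain
machine facts; the two exits are then the pure lemmas `f2a_of_exit` (0x1158f8 = `cut230`: SD.6, the entry of R1) and `f2a_of_after1`
(0x115293 = `cut190`: the return of the call). -/
theorem seg (Lay : Layout) (hLay : Lay.hi = 0x1000000) (μ : Microarch) (hμ : UserX.MicroOK μ) (u₀ : State)
    (hcode : HasCodeNat Lay u₀ Vorbis.L.start_decoder.entry Vorbis.Code.code_start_decoder.nat Vorbis.L.start_decoder.size)
    (hload4 : Asan.SmallCheck Lay μ Vorbis.WayInv (Vorbis.CodeOK u₀) [.rax, .rcx, .rdx] 4 Vorbis.L.__asan_load4_noabort.entry)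
    (hgb : ∀ (others : List Obj) (frames : List (Nat × FrameLayout)) (Blk : Block → Prop) (len : Nat),
      Calls Lay μ Vorbis.WayInv (Vorbis.conv u₀) Vorbis.L.get_bits.entry (Vorbis.Spec.get_bits.spec others frames Blk len)) :
    SegF2a Lay μ u₀ := by
  intro g i v hat
  obtain ⟨A5, A, hb⟩ := hat
  -- 0x11526a … the exit `jle 1158f8` or the return of `get_bits(f, 16)` at 0x115293
  refine (f2_head Lay hLay μ hμ u₀ hcode hload4 hgb g i A5 A v hb).mono ?_
  intro w hw
  rcases hw with hexit | hafter
  · -- 0x1158f8 (`cut230`): the floor loop is done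
    exact Or.inl (f2a_of_exit hb hexit)
  · -- 0x115293 (`cut190`): `get_bits(f, 16)` returned
    exact Or.inr (f2a_of_after1 hb hafter)

end Vorbis.Spec.start_decoder_F2a

theorem Vorbis.Spec.Worked.start_decoder_F2a_ok : Vorbis.Spec.start_decoder_F2a.Statement := by
  unfold Vorbis.Spec.start_decoder_F2a.Statement
  intro Lay hLay μ hμ u₀ hcode hload4 hgb
  exact Vorbis.Spec.start_decoder_F2a.seg Lay hLay μ hμ u₀ hcode hload4 hgb
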